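-- pv_equiv track=rewrite | github.com/SmolPC-2-0/smolpc-blenderhelper | blender_addon/blender_helper.py | _find_shapes_ordered
-- ===== SOURCE A (Python) =====
-- def _find_shapes_ordered(text: str):
--     t = text
--     candidates = {
--         "uv sphere": "uv_sphere",
--         "ico sphere": "ico_sphere",
--         "icosphere": "ico_sphere",
--         "pyramid": "pyramid",
--         "cone": "cone",
--         "cylinder": "cylinder",
--         "sphere": "uv_sphere",
--         "circle": "circle",
--         "plane": "plane",
--         "rectangle": "plane",
--         "square": "plane",
--         "diamond": "diamond",
--         "cube": "cube",
--         "box": "cube",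
--     }
--     hits = []
--     for key, norm in candidates.items():
--         idx = t.find(key)
--         if idx != -1:
--             hits.append((idx, norm))
--     hits.sort(key=lambda x: x[0])
--     return [norm for _, norm in hits]
-- ===== SOURCE B (Python) =====
-- def _find_shapes_ordered(text: str):
--     candidates = {
--         "uv sphere": "uv_sphere",
--         "ico sphere": "ico_sphere",
--         "icosphere": "ico_sphere",
--         "pyramid": "pyramid",
--         "cone": "cone",
--         "cylinder": "cylinder",
--         "sphere": "uv_sphere",
--         "circle": "circle",
--         "plane": "plane",
--         "rectangle": "plane",
--         "square": "plane",
--         "diamond": "diamond",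
--         "cube": "cube",
--         "box": "cube",
--     }
--     found = set()
--     result = []
--     for i in range(len(text)):
--         for key, norm in candidates.items():
--             if key not in found and text.startswith(key, i):
--                 result.append(norm)
--                 found.add(key)
--     return result
-- ===== Notes on version B (the rewrite author's own statement) =====
-- stated objective: alternative
-- what changed: Replaces the find-per-keyword + stable sort with a single left-to-right scan over the text that tests each not-yet-found keyword at every position, emitting norms in position order directly (no per-keyword find, no sort).
import Mathlib
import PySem

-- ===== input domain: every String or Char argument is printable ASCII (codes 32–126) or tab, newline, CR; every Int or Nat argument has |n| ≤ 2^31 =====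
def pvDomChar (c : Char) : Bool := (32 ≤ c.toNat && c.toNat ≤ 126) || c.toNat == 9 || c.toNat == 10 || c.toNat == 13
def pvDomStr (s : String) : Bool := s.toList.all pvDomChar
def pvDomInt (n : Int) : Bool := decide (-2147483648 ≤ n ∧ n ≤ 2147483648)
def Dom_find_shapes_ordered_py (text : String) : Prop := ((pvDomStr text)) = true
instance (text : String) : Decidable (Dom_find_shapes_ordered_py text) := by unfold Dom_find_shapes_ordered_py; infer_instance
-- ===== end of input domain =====

-- B replaces A's find-per-keyword + stable sort with one left-to-right scan of the text that
-- emits each not-yet-found keyword's norm at its first occurrence (objective: alternative).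

-- ===== PORT A =====
-- the candidates dict (string keys, insertion order) as an association list; shared keyword→norm table
def shapeCandidates : List (String × String) :=
  [("uv sphere", "uv_sphere"), ("ico sphere", "ico_sphere"), ("icosphere", "ico_sphere"),
   ("pyramid", "pyramid"), ("cone", "cone"), ("cylinder", "cylinder"), ("sphere", "uv_sphere"),
   ("circle", "circle"), ("plane", "plane"), ("rectangle", "plane"), ("square", "plane"),
   ("diamond", "diamond"), ("cube", "cube"), ("box", "cube")]

def find_shapes_ordered_py (text : String) : List String :=
  let t := text
  let hits : List (Int × String) :=
    shapeCandidates.foldl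
      (fun hits kn =>
        let idx := PySem.Str.find t kn.1
        if idx ≠ -1 then hits ++ [(idx, kn.2)] else hits) []
  (PySem.List.sorted hits (fun x => x.1)).map (fun x => x.2)

-- ===== PORT B =====
-- Python's text.startswith(key, i) with 0 ≤ i ≤ len(text) is exactly
-- PySem.Chars.startswith (text.toList.drop i) key.toList (prefix test on the tail) — exact here.
def find_shapes_ordered_py_alt (text : String) : List String :=
  let cs := text.toList
  ((List.range cs.length).foldl
      (fun (st : List String × PySem.Set String) i =>
        shapeCandidates.foldl
          (fun (st : List String × PySem.Set String) kn =>
            if !(PySem.Set.contains st.2 kn.1) && PySem.Chars.startswith (cs.drop i) kn.1.toList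
            then (st.1 ++ [kn.2], PySem.Set.add st.2 kn.1)
            else st) st)
      ([], PySem.Set.empty)).1

-- ===== PRECONDITION & SPEC =====
def Spec_find_shapes_ordered_py (text : String) (out : List String) : Prop := out = find_shapes_ordered_py_alt text
instance (text : String) (out : List String) : Decidable (Spec_find_shapes_ordered_py text out) := by unfold Spec_find_shapes_ordered_py; infer_instance

-- ===== CLAIM (what is proved, stated in full; the proofs are below) =====
def Claim_equal_find_shapes_ordered_py : Prop := ∀ (text : String), Dom_find_shapes_ordered_py text → Spec_find_shapes_ordered_py text (find_shapes_ordered_py text)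

-- ===== LEMMAS AND PROOFS =====

-- facts about the literal candidate table
lemma cands_nonempty : ∀ kn ∈ shapeCandidates, kn.1.toList ≠ [] := by decide

lemma cands_keys_nodup : (shapeCandidates.map (·.1)).Nodup := by decide

lemma cands_prefix_free :
    shapeCandidates.Pairwise (fun a b => ¬ a.1.toList <+: b.1.toList ∧ ¬ b.1.toList <+: a.1.toList) := by
  decide

-- find s sub = i (a Nat cast) ↔ sub is a prefix at i and at no earlier position
lemma find_le_of_prefix (cs sub : List Char) (i : Nat) (hp : sub <+: cs.drop i) :
    0 ≤ PySem.Chars.find cs sub ∧ PySem.Chars.find cs sub ≤ (i : Int) := by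
  have hinf : sub <:+: cs := by
    obtain ⟨r, hr⟩ := hp
    exact ⟨cs.take i, r, by rw [List.append_assoc, hr]; exact List.take_append_drop i cs⟩
  have h0 : 0 ≤ PySem.Chars.find cs sub := (PySem.Chars.find_nonneg_iff cs sub).mpr hinf
  refine ⟨h0, ?_⟩
  obtain ⟨h1, h2⟩ := PySem.Chars.find_spec h0
  by_contra hlt
  rw [Int.not_le] at hlt
  have : i < (PySem.Chars.find cs sub).toNat := by omega
  exact h2 i this hp



lemma find_eq_natCast_iff (cs sub : List Char) (i : Nat) :
    PySem.Chars.find cs sub = (i : Int) ↔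
      (sub <+: cs.drop i ∧ ∀ j < i, ¬ sub <+: cs.drop j) := by
  constructor
  · intro h
    have h0 : 0 ≤ PySem.Chars.find cs sub := by rw [h]; positivity
    obtain ⟨h1, h2⟩ := PySem.Chars.find_spec h0
    have ht : (PySem.Chars.find cs sub).toNat = i := by omega
    rw [ht] at h1 h2
    exact ⟨h1, h2⟩
  · rintro ⟨hp, hmin⟩
    obtain ⟨h0, hle⟩ := find_le_of_prefix cs sub i hp
    obtain ⟨h1, _⟩ := PySem.Chars.find_spec h0
    have : ¬ (PySem.Chars.find cs sub).toNat < i := fun hlt => hmin _ hlt h1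
    omega


-- a prefix at i bounds find from above
lemma find_lt_length (cs sub : List Char) (hne : sub ≠ [])
    (h : 0 ≤ PySem.Chars.find cs sub) : PySem.Chars.find cs sub < (cs.length : Int) := by
  obtain ⟨h1, _⟩ := PySem.Chars.find_spec h
  have hle := PySem.Chars.find_le_length cs sub
  rcases Nat.lt_or_ge (PySem.Chars.find cs sub).toNat cs.length with hlt | hge
  · omega
  · exfalso
    have : cs.drop (PySem.Chars.find cs sub).toNat = [] := List.drop_eq_nil_of_le hge
    rw [this] at h1
    exact hne (List.prefix_nil.mp h1)

-- the bucket at position i: candidates whose first occurrence in cs is exactly i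
def shapeBuck (cs : List Char) (i : Nat) : List (String × String) :=
  shapeCandidates.filter (fun kn => decide (PySem.Chars.find cs kn.1.toList = (i : Int)))

def shapePairs (cs : List Char) : List (Int × String) :=
  (List.range cs.length).flatMap (fun i => (shapeBuck cs i).map (fun kn => ((i : Int), kn.2)))

-- ---- A side ----

lemma hitsA_eq (text : String) :
    shapeCandidates.foldl
      (fun (hits : List (Int × String)) kn =>
        let idx := PySem.Str.find text kn.1
        if idx ≠ -1 then hits ++ [(idx, kn.2)] else hits) []
    = (shapeCandidates.filter (fun kn => decide (PySem.Chars.find text.toList kn.1.toList ≠ -1))).map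
        (fun kn => (PySem.Chars.find text.toList kn.1.toList, kn.2)) := by
  have h := PySem.List.foldl_append_if
      (p := fun kn : String × String => decide (PySem.Str.find text kn.1 ≠ -1))
      (f := fun kn : String × String => (PySem.Str.find text kn.1, kn.2)) shapeCandidates []
  simp only [decide_eq_true_eq, PySem.Str.find_eq] at h ⊢
  simpa using h


-- bucket congruence: inside a bucket the stored pair is (find, norm)
lemma buck_map_pair (cs : List Char) (i : Nat) :
    (shapeBuck cs i).map (fun kn => ((i : Int), kn.2))
      = (shapeBuck cs i).map (fun kn => (PySem.Chars.find cs kn.1.toList, kn.2)) := by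
  refine List.map_congr_left ?_
  intro kn hkn
  have := (List.mem_filter.mp hkn).2
  simp only [decide_eq_true_eq] at this
  rw [this]


-- generic: flatMapping buckets over range N permutes the filtered list
lemma flatMap_filter_cons_eq {α : Type} (f : α → Int) (x : α) (l : List α) (K : Nat)
    (hx : ∀ i : Nat, i < K → f x ≠ (i : Int)) :
    (List.range K).flatMap (fun (i : Nat) => (x :: l).filter (fun y => decide (f y = (i : Int))))
      = (List.range K).flatMap (fun (i : Nat) => l.filter (fun y => decide (f y = (i : Int)))) := by
  refine List.flatMap_congr ?_
  intro i hi
  rw [List.mem_range] at hi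
  rw [List.filter_cons]
  simp [hx i hi]


lemma flatMap_filter_cons_perm {α : Type} (f : α → Int) (x : α) (l : List α) (N : Nat)
    (h0 : 0 ≤ f x) (hN : f x < (N : Int)) :
    ((List.range N).flatMap (fun (i : Nat) => (x :: l).filter (fun y => decide (f y = (i : Int))))).Perm
      (x :: (List.range N).flatMap (fun (i : Nat) => l.filter (fun y => decide (f y = (i : Int))))) := by
  induction N with
  | zero => omega
  | succ M ih =>
    rw [List.range_succ, List.flatMap_append, List.flatMap_append]
    simp only [List.flatMap_cons, List.flatMap_nil, List.append_nil]
    rcases eq_or_lt_of_le (show f x ≤ (M : Int) by exact_mod_cast Int.lt_add_one_iff.mp hN) with he | hlt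
    · -- f x = M : all earlier buckets drop x, bucket M keeps it
      have hearly : (List.range M).flatMap (fun (i : Nat) => (x :: l).filter (fun y => decide (f y = (i : Int))))
          = (List.range M).flatMap (fun (i : Nat) => l.filter (fun y => decide (f y = (i : Int)))) := by
        refine flatMap_filter_cons_eq f x l M ?_
        intro i hi hfi
        rw [hfi] at he
        have : i = M := by exact_mod_cast he
        omega
      rw [hearly, List.filter_cons]
      simp only [he, decide_true, if_pos]
      exact List.perm_middle
    · have := ih hlt
      rw [List.filter_cons]
      have hne : ¬ (f x = (M : Int)) := by omega
      simp only [hne, decide_false, Bool.false_eq_true, ite_false]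
      simpa using this.append_right (l.filter (fun y => decide (f y = (M : Int))))


lemma perm_buckets {α : Type} (f : α → Int) :
    ∀ (l : List α) (N : Nat), (∀ x ∈ l, f x ≠ -1 → 0 ≤ f x ∧ f x < (N : Int)) →
    ((List.range N).flatMap (fun (i : Nat) => l.filter (fun y => decide (f y = (i : Int))))).Perm
      (l.filter (fun y => decide (f y ≠ -1))) := by
  intro l
  induction l with
  | nil => intro N _; simp
  | cons x t ih =>
    intro N hb
    by_cases hx : f x = -1
    · have heq : (List.range N).flatMap (fun (i : Nat) => (x :: t).filter (fun y => decide (f y = (i : Int))))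
          = (List.range N).flatMap (fun (i : Nat) => t.filter (fun y => decide (f y = (i : Int)))) := by
        refine flatMap_filter_cons_eq f x t N ?_
        intro i _ hfi; rw [hfi] at hx; omega
      rw [heq, List.filter_cons]
      simp only [hx, ne_eq, not_true_eq_false, decide_false, Bool.false_eq_true, ite_false]
      exact ih N (fun y hy => hb y (List.mem_cons_of_mem x hy))
    · obtain ⟨h0, hN⟩ := hb x (List.mem_cons_self) hx
      have hperm := flatMap_filter_cons_perm f x t N h0 hN
      rw [List.filter_cons]
      simp only [hx, ne_eq, decide_true, if_pos, not_false_eq_true]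
      exact hperm.trans ((ih N (fun y hy => hb y (List.mem_cons_of_mem x hy))).cons x)

-- at most one candidate has its first occurrence at i (keys are mutually prefix-free)
lemma buck_subsingleton (cs : List Char) (i : Nat) {a b : String × String}
    (h : [a, b].Sublist (shapeBuck cs i)) : False := by
  have hpw : (shapeBuck cs i).Pairwise
      (fun a b => ¬ a.1.toList <+: b.1.toList ∧ ¬ b.1.toList <+: a.1.toList) :=
    cands_prefix_free.filter _
  have hQ := List.pairwise_iff_forall_sublist.mp hpw h
  have ha : a ∈ shapeBuck cs i := h.subset (by simp)
  have hb : b ∈ shapeBuck cs i := h.subset (by simp)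
  have hfa := (List.mem_filter.mp ha).2
  have hfb := (List.mem_filter.mp hb).2
  simp only [decide_eq_true_eq] at hfa hfb
  have hpa := ((find_eq_natCast_iff cs a.1.toList i).mp hfa).1
  have hpb := ((find_eq_natCast_iff cs b.1.toList i).mp hfb).1
  rcases List.prefix_or_prefix_of_prefix hpa hpb with hc | hc
  · exact hQ.1 hc
  · exact hQ.2 hc

lemma pairs_pairwise_aux (cs : List Char) (N : Nat) :
    ((List.range N).flatMap
      (fun (i : Nat) => (shapeBuck cs i).map (fun kn => ((i : Int), kn.2)))).Pairwise
      (fun p q => p.1 < q.1) := by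
  induction N with
  | zero => simp
  | succ M ih =>
    rw [List.range_succ, List.flatMap_append, List.pairwise_append]
    refine ⟨ih, ?_, ?_⟩
    · simp only [List.flatMap_cons, List.flatMap_nil, List.append_nil]
      rw [List.pairwise_map, List.pairwise_iff_forall_sublist]
      intro a b hs
      exact (buck_subsingleton cs M hs).elim
    · intro p hp q hq
      simp only [List.mem_flatMap, List.mem_range, List.mem_map] at hp
      simp only [List.flatMap_cons, List.flatMap_nil, List.append_nil, List.mem_map] at hq
      obtain ⟨i, hiM, kn, _, rfl⟩ := hp
      obtain ⟨kn', _, rfl⟩ := hq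
      show (i : Int) < (M : Int)
      exact_mod_cast hiM

lemma shapePairs_pairwise (cs : List Char) :
    (shapePairs cs).Pairwise (fun p q => p.1 < q.1) :=
  pairs_pairwise_aux cs cs.length

lemma shapePairs_perm (text : String) :
    (shapePairs text.toList).Perm
      ((shapeCandidates.filter (fun kn => decide (PySem.Chars.find text.toList kn.1.toList ≠ -1))).map
        (fun kn => (PySem.Chars.find text.toList kn.1.toList, kn.2))) := by
  have h1 : shapePairs text.toList
      = ((List.range text.toList.length).flatMap
          (fun (i : Nat) => shapeCandidates.filter
            (fun kn => decide (PySem.Chars.find text.toList kn.1.toList = (i : Int))))).map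
          (fun kn => (PySem.Chars.find text.toList kn.1.toList, kn.2)) := by
    rw [List.map_flatMap]
    exact List.flatMap_congr (fun i _ => buck_map_pair text.toList i)
  rw [h1]
  refine List.Perm.map _ ?_
  refine perm_buckets (fun kn => PySem.Chars.find text.toList kn.1.toList) shapeCandidates _ ?_
  intro kn hkn hne
  simp only at hne
  have h0 : 0 ≤ PySem.Chars.find text.toList kn.1.toList := by
    have := PySem.Chars.neg_one_le_find text.toList kn.1.toList
    omega
  exact ⟨h0, find_lt_length text.toList kn.1.toList (cands_nonempty kn hkn) h0⟩

lemma portA_eq (text : String) :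
    find_shapes_ordered_py text = (shapePairs text.toList).map (fun x => x.2) := by
  show (List.map (fun x => x.2) (PySem.List.sorted (List.foldl
      (fun (hits : List (Int × String)) kn =>
        let idx := PySem.Str.find text kn.1
        if idx ≠ -1 then hits ++ [(idx, kn.2)] else hits) [] shapeCandidates) (fun x => x.1)))
    = List.map (fun x => x.2) (shapePairs text.toList)
  rw [hitsA_eq]
  congr 1
  exact PySem.List.sorted_eq_of_perm_of_pairwise_lt _ _ _
    (shapePairs_perm text) (shapePairs_pairwise text.toList)

-- ---- B side ----

lemma innerB (cs : List Char) (i : Nat) :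
    ∀ (l : List (String × String)) (res found : List String),
    (l.map (·.1)).Nodup →
    (∀ kn ∈ l, kn.1.toList ≠ []) →
    (∀ kn ∈ l, (kn.1 ∈ found ↔ (0 ≤ PySem.Chars.find cs kn.1.toList ∧ PySem.Chars.find cs kn.1.toList < (i : Int)))) →
    l.foldl
      (fun (st : List String × PySem.Set String) kn =>
        if !(PySem.Set.contains st.2 kn.1) && PySem.Chars.startswith (cs.drop i) kn.1.toList
        then (st.1 ++ [kn.2], PySem.Set.add st.2 kn.1)
        else st) (res, found)
    = (res ++ (l.filter (fun kn => decide (PySem.Chars.find cs kn.1.toList = (i : Int)))).map (·.2),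
       found ++ (l.filter (fun kn => decide (PySem.Chars.find cs kn.1.toList = (i : Int)))).map (·.1)) := by
  intro l
  induction l with
  | nil => intro res found _ _ _; simp
  | cons kn t ih =>
    intro res found hnd hne hchar
    have hnd' : (t.map (·.1)).Nodup := by
      rw [List.map_cons, List.nodup_cons] at hnd; exact hnd.2
    have hhead : kn.1 ∉ t.map (·.1) := by
      rw [List.map_cons, List.nodup_cons] at hnd; exact hnd.1
    simp only [List.foldl_cons]
    by_cases hF : PySem.Chars.find cs kn.1.toList = (i : Int)
    · have hpre : kn.1.toList <+: cs.drop i := ((find_eq_natCast_iff cs kn.1.toList i).mp hF).1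
      have hsw : PySem.Chars.startswith (cs.drop i) kn.1.toList = true :=
        (PySem.Chars.startswith_iff _ _).mpr hpre
      have hnotmem : kn.1 ∉ found := by
        intro hmem
        have h2 := (hchar kn List.mem_cons_self).mp hmem
        rw [hF] at h2
        omega
      have hcont : PySem.Set.contains found kn.1 = false := by
        rcases Bool.eq_false_or_eq_true (PySem.Set.contains found kn.1) with h | h
        · exact absurd ((PySem.Set.contains_iff found kn.1).mp h) hnotmem
        · exact h
      simp only [hcont, hsw, Bool.not_false, Bool.true_and, if_true]
      rw [show PySem.Set.add found kn.1 = found ++ [kn.1] from PySem.Set.add_of_not_mem hnotmem]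
      rw [ih (res ++ [kn.2]) (found ++ [kn.1]) hnd'
          (fun kn' h => hne kn' (List.mem_cons_of_mem kn h)) ?_]
      · rw [List.filter_cons]
        simp only [hF, decide_true, if_true]
        simp [List.append_assoc]
      · intro kn' hkn'
        have hneq : kn'.1 ≠ kn.1 := by
          intro he
          exact hhead (he ▸ List.mem_map_of_mem hkn')
        rw [List.mem_append, List.mem_singleton]
        rw [hchar kn' (List.mem_cons_of_mem kn hkn')]
        simp [hneq]
    · have hcf : (!PySem.Set.contains found kn.1 && PySem.Chars.startswith (cs.drop i) kn.1.toList) = false := by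
        by_contra hc
        rw [Bool.not_eq_false, Bool.and_eq_true] at hc
        obtain ⟨hc1', hc2⟩ := hc
        have hc1 : PySem.Set.contains found kn.1 = false := by simpa using hc1'
        have hpre := (PySem.Chars.startswith_iff _ _).mp hc2
        obtain ⟨h0, hle⟩ := find_le_of_prefix cs kn.1.toList i hpre
        have hnm : kn.1 ∉ found := by
          intro hm
          rw [(PySem.Set.contains_iff found kn.1).mpr hm] at hc1
          cases hc1
        have h2 : ¬ (0 ≤ PySem.Chars.find cs kn.1.toList ∧ PySem.Chars.find cs kn.1.toList < (i : Int)) :=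
          fun hh => hnm ((hchar kn List.mem_cons_self).mpr hh)
        apply hF
        omega
      simp only [hcf, Bool.false_eq_true, if_false]
      rw [ih res found hnd' (fun kn' h => hne kn' (List.mem_cons_of_mem kn h))
          (fun kn' h => hchar kn' (List.mem_cons_of_mem kn h))]
      rw [List.filter_cons]
      simp [hF]

lemma outerB (cs : List Char) : ∀ (N : Nat),
    ∃ found : List String,
      (List.range N).foldl
        (fun (st : List String × PySem.Set String) i =>
          shapeCandidates.foldl
            (fun (st : List String × PySem.Set String) kn =>
              if !(PySem.Set.contains st.2 kn.1) && PySem.Chars.startswith (cs.drop i) kn.1.toList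
              then (st.1 ++ [kn.2], PySem.Set.add st.2 kn.1)
              else st) st)
        ([], PySem.Set.empty)
      = ((List.range N).flatMap (fun i => (shapeBuck cs i).map (·.2)), found)
      ∧ ∀ k, k ∈ found ↔ ∃ kn ∈ shapeCandidates, kn.1 = k ∧
          0 ≤ PySem.Chars.find cs kn.1.toList ∧ PySem.Chars.find cs kn.1.toList < (N : Int) := by
  intro N
  induction N with
  | zero =>
    refine ⟨[], by simp [PySem.Set.empty], ?_⟩
    intro k
    simp only [List.not_mem_nil, false_iff]
    rintro ⟨kn, _, _, h1, h2⟩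
    omega
  | succ M ih =>
    obtain ⟨fd, heq, hchar⟩ := ih
    rw [List.range_succ, List.foldl_append, heq]
    simp only [List.foldl_cons, List.foldl_nil]
    have hc : ∀ kn ∈ shapeCandidates,
        (kn.1 ∈ fd ↔ (0 ≤ PySem.Chars.find cs kn.1.toList ∧ PySem.Chars.find cs kn.1.toList < (M : Int))) := by
      intro kn hkn
      rw [hchar kn.1]
      constructor
      · rintro ⟨kn', _, he, h1, h2⟩
        rw [he] at h1 h2
        exact ⟨h1, h2⟩
      · intro hh
        exact ⟨kn, hkn, rfl, hh⟩
    rw [innerB cs M shapeCandidates _ fd cands_keys_nodup cands_nonempty hc]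
    refine ⟨fd ++ (shapeCandidates.filter
        (fun kn => decide (PySem.Chars.find cs kn.1.toList = (M : Int)))).map (·.1), ?_, ?_⟩
    · simp [List.flatMap_append, shapeBuck]
    · intro k
      rw [List.mem_append, hchar k]
      simp only [List.mem_map, List.mem_filter, decide_eq_true_eq]
      constructor
      · rintro (⟨kn, hkn, he, h1, h2⟩ | ⟨kn, ⟨hkn, hFM⟩, he⟩)
        · exact ⟨kn, hkn, he, h1, by push_cast; omega⟩
        · exact ⟨kn, hkn, he, by rw [hFM]; positivity, by rw [hFM]; push_cast; omega⟩
      · rintro ⟨kn, hkn, he, h1, h2⟩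
        by_cases hFM : PySem.Chars.find cs kn.1.toList = (M : Int)
        · exact Or.inr ⟨kn, ⟨hkn, hFM⟩, he⟩
        · refine Or.inl ⟨kn, hkn, he, h1, ?_⟩
          push_cast at h2
          omega

lemma portB_eq (text : String) :
    find_shapes_ordered_py_alt text
      = (List.range text.toList.length).flatMap (fun i => (shapeBuck text.toList i).map (·.2)) := by
  obtain ⟨fd, heq, _⟩ := outerB text.toList text.toList.length
  show ((List.range text.toList.length).foldl
      (fun (st : List String × PySem.Set String) i =>
        shapeCandidates.foldl
          (fun (st : List String × PySem.Set String) kn =>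
            if !(PySem.Set.contains st.2 kn.1) && PySem.Chars.startswith (text.toList.drop i) kn.1.toList
            then (st.1 ++ [kn.2], PySem.Set.add st.2 kn.1)
            else st) st)
      ([], PySem.Set.empty)).1
    = (List.range text.toList.length).flatMap (fun i => (shapeBuck text.toList i).map (·.2))
  rw [heq]

-- ===== VERDICT (by name: the statement is the Claim_ definition above) =====
theorem find_shapes_ordered_py_spec : Claim_equal_find_shapes_ordered_py := by
  intro text _
  unfold Spec_find_shapes_ordered_py
  rw [portA_eq, portB_eq, shapePairs, List.map_flatMap]
  refine List.flatMap_congr ?_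
  intro i _
  rw [List.map_map]
  rfl
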